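-- pv_equiv track=rewrite | github.com/eronekogin/leetcode | 2023/maximum_number_of_ways_to_partition_an_array.py | ways_to_partition
-- ===== SOURCE A (Python) =====
-- from itertools import accumulate
-- from collections import Counter
--
-- def ways_to_partition(nums: list[int], k: int) -> int:
--     """
--     ways_to_partition
--     """
--     prefix_sum = list(accumulate(nums))
--     total = prefix_sum[-1]
--     prev_half = Counter()
--     next_half = Counter(prefix_sum)
--
--     next_half[total] -= 1  # Last prefix sum is never used.
--
--     max_pivots = 0
--     if total & 1 == 0:  # Even sum
--         max_pivots = next_half[total >> 1]
--
--     # Try to change any num at index i to k.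
--     n = len(nums)
--     for i, v in enumerate(nums):
--         curr_pivots = 0
--
--         if v != k:
--             new_total = total + k - v
--             if new_total & 1 == 0:  # New total is even sum.
--                 half_sum = new_total >> 1
--                 if i > 0:
--                     curr_pivots += prev_half[half_sum]
--
--                 if i + 1 < n:
--                     curr_pivots += next_half[half_sum + v - k]
--
--             max_pivots = max(max_pivots, curr_pivots)
--
--         prev_half[prefix_sum[i]] += 1
--         next_half[prefix_sum[i]] -= 1
--
--     return max_pivots
-- ===== SOURCE B (Python) =====
-- def ways_to_partition(nums: list[int], k: int) -> int:
--     """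
--     ways_to_partition
--     """
--     n = len(nums)
--     prefix = []
--     s = 0
--     for x in nums:
--         s += x
--         prefix.append(s)
--     total = prefix[-1]
--     # index buckets: value -> increasing list of cut positions j in [0, n-2]
--     pos = {}
--     for j in range(n - 1):
--         pos.setdefault(prefix[j], []).append(j)
--     best = len(pos.get(total // 2, [])) if total % 2 == 0 else 0
--     for i, v in enumerate(nums):
--         if v == k:
--             continue
--         new_total = total + k - v
--         if new_total % 2 != 0:
--             continue
--         half = new_total // 2
--         c = sum(1 for j in pos.get(half, []) if j < i)
--         c += sum(1 for j in pos.get(half + v - k, []) if j >= i)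
--         best = max(best, c)
--     return best
-- ===== Notes on version B (the rewrite author's own statement) =====
-- stated objective: alternative
-- what changed: Replaces A's two rolling Counter multisets (mutated at every loop step) with a dict of per-value cut-index lists built once from the prefix sums; each candidate change is then answered by counting bucket indices before/after i, which makes the i>0 / i+1<n boundary guards disappear.
import Mathlib
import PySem

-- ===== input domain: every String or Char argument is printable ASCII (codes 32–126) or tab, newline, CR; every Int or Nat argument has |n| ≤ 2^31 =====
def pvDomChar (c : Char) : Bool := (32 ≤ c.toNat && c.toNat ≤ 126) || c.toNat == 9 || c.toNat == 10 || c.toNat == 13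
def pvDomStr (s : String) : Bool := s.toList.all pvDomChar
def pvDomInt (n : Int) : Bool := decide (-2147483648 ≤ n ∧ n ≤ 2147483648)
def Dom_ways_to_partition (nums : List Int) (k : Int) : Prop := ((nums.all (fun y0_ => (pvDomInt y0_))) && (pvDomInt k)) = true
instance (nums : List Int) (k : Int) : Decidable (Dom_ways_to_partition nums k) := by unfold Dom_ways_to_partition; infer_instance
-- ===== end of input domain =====

-- B replaces A's two rolling Counters with a dict of (sorted) cut-index buckets built once and
-- queried per candidate change; same return value, no speed claim (objective: alternative).

-- ===== PORT A =====

-- itertools.accumulate(nums)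
def pvAccFrom (s : Int) : List Int → List Int
  | [] => []
  | x :: xs => (s + x) :: pvAccFrom (s + x) xs

-- the body of A's `for i, v in enumerate(nums)` loop; state = (prev_half, next_half, max_pivots)
def pvStepA (prefix_sum : List Int) (total k n : Int)
    (st : PySem.Dict Int Int × PySem.Dict Int Int × Int) (p : Int × Int) :
    PySem.Dict Int Int × PySem.Dict Int Int × Int :=
  let i := p.1
  let v := p.2
  let m :=
    if v ≠ k then
      let curr : Int :=
        if PySem.Int.band (total + k - v) 1 == 0 then
          let half := (total + k - v) >>> (1 : Nat)
          (if 0 < i then st.1.getD half 0 else 0) +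
          (if i + 1 < n then st.2.1.getD (half + v - k) 0 else 0)
        else 0
      max st.2.2 curr
    else st.2.2
  let pv := PySem.List.pyGetD prefix_sum i 0
  (st.1.modify pv 0 (· + 1), st.2.1.modify pv 0 (· - 1), m)

def ways_to_partition (nums : List Int) (k : Int) : Int :=
  let prefix_sum := pvAccFrom 0 nums
  let total := (PySem.List.pyGet? prefix_sum (-1)).getD 0   -- prefix_sum[-1]; IndexError on [] excluded by Pre_
  let next_half := (PySem.Dict.counter prefix_sum).modify total 0 (· - 1)
  let max_pivots : Int := if PySem.Int.band total 1 == 0 then next_half.getD (total >>> (1 : Nat)) 0 else 0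
  let n : Int := nums.length
  ((PySem.List.enumerate nums 0).foldl (pvStepA prefix_sum total k n)
    ((PySem.Dict.empty : PySem.Dict Int Int), next_half, max_pivots)).2.2

-- ===== PORT B =====

-- the body of B's `for i, v in enumerate(nums)` loop over the bucket dict `pos`
def pvStepB (pos : PySem.Dict Int (List Int)) (total k : Int) (best : Int) (p : Int × Int) : Int :=
  let i := p.1
  let v := p.2
  if v == k then best
  else if PySem.Int.mod (total + k - v) 2 != 0 then best
  else
    let half := PySem.Int.floordiv (total + k - v) 2
    let c : Int := ((pos.getD half []).countP (fun j => decide (j < i)) : Int) +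
                   ((pos.getD (half + v - k) []).countP (fun j => decide (i ≤ j)) : Int)
    max best c

def ways_to_partition_alt (nums : List Int) (k : Int) : Int :=
  let n : Int := nums.length
  let pre := (nums.foldl (fun st x => (st.1 ++ [st.2 + x], st.2 + x)) (([] : List Int), (0 : Int))).1
  let total := (PySem.List.pyGet? pre (-1)).getD 0
  -- pos.setdefault(prefix[j], []).append(j) for j in range(n-1)
  let pos := ((PySem.List.pyRange 0 (n - 1) 1).map (fun j => (PySem.List.pyGetD pre j 0, j))).foldl
      (fun d q => d.modify q.1 [] (· ++ [q.2])) (PySem.Dict.empty : PySem.Dict Int (List Int))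
  let best : Int := if PySem.Int.mod total 2 == 0 then ((pos.getD (PySem.Int.floordiv total 2) []).length : Int) else 0
  (PySem.List.enumerate nums 0).foldl (pvStepB pos total k) best

-- ===== PRECONDITION & SPEC =====
-- A evaluates prefix_sum[-1], which raises IndexError on the empty list: Pre_ excludes nums = [].
def Pre_ways_to_partition (nums : List Int) (k : Int) : Prop := nums ≠ []
instance (nums : List Int) (k : Int) : Decidable (Pre_ways_to_partition nums k) := by
  unfold Pre_ways_to_partition; infer_instance

def pvWitness_ways_to_partition : List Int × Int := ([0, 0, 1, -1], 0)

def Spec_ways_to_partition (nums : List Int) (k : Int) (out : Int) : Prop := out = ways_to_partition_alt nums k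
instance (nums : List Int) (k : Int) (out : Int) : Decidable (Spec_ways_to_partition nums k out) := by
  unfold Spec_ways_to_partition; infer_instance

-- ===== CLAIM (what is proved, stated in full; the proofs are below) =====
def Claim_equal_ways_to_partition : Prop := ∀ (nums : List Int) (k : Int), Dom_ways_to_partition nums k → Pre_ways_to_partition nums k → Spec_ways_to_partition nums k (ways_to_partition nums k)

-- ===== LEMMAS AND PROOFS =====

theorem pvAccFrom_length (s : Int) (l : List Int) : (pvAccFrom s l).length = l.length := by
  induction l generalizing s with
  | nil => rfl
  | cons x xs ih => simp [pvAccFrom, ih]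

theorem pvB_prefix_eq (l : List Int) : ∀ (acc : List Int) (s : Int),
    (l.foldl (fun st x => (st.1 ++ [st.2 + x], st.2 + x)) (acc, s)).1 = acc ++ pvAccFrom s l := by
  induction l with
  | nil => simp [pvAccFrom]
  | cons x xs ih => intro acc s; simp [pvAccFrom, ih, List.append_assoc]

-- number of j in range(i) with P[j] == c is the count of c among the first i elements
theorem pvCntRange (P : List Int) (c : Int) : ∀ (i : Nat), i ≤ P.length →
    (PySem.List.pyRange 0 (i : Int) 1).countP (fun j => PySem.List.pyGetD P j 0 == c)
      = (P.take i).count c := by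
  intro i
  induction i with
  | zero => intro _; simp [PySem.List.pyRange_one_eq_nil]
  | succ i ih =>
    intro hi
    have h1 : ((i + 1 : Nat) : Int) = (i : Int) + 1 := by push_cast; ring
    rw [h1, PySem.List.pyRange_one_succ_right (by positivity), List.countP_append]
    have hlt : i < P.length := by omega
    have hg : PySem.List.pyGetD P (i : Int) 0 = P[i] := by
      rw [PySem.List.pyGetD_natCast, List.getD_eq_getElem]
    rw [List.take_add_one, List.count_append, ih (by omega)]
    simp [hg, List.getElem?_eq_getElem hlt, List.count_singleton]

theorem pvCntLt (P : List Int) (c : Int) (i m : Nat) (him : i ≤ m) (hm : m ≤ P.length) :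
    ((PySem.List.pyRange 0 (m : Int) 1).filter (fun j => PySem.List.pyGetD P j 0 == c)).countP
        (fun j => decide (j < (i : Int)))
      = (P.take i).count c := by
  rw [PySem.List.pyRange_one_append 0 (i : Int) (m : Int) (by positivity) (by exact_mod_cast him),
      List.filter_append, List.countP_append]
  have h2 : (((PySem.List.pyRange (i : Int) (m : Int) 1).filter
      (fun j => PySem.List.pyGetD P j 0 == c)).countP (fun j => decide (j < (i : Int)))) = 0 := by
    rw [List.countP_eq_zero]
    intro j hj
    have := (PySem.List.mem_pyRange_one.1 (List.mem_of_mem_filter hj)).1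
    simp; omega
  have h1 : (((PySem.List.pyRange 0 (i : Int) 1).filter
      (fun j => PySem.List.pyGetD P j 0 == c)).countP (fun j => decide (j < (i : Int))))
      = ((PySem.List.pyRange 0 (i : Int) 1).filter (fun j => PySem.List.pyGetD P j 0 == c)).length := by
    rw [List.countP_eq_length]
    intro j hj
    have := (PySem.List.mem_pyRange_one.1 (List.mem_of_mem_filter hj)).2
    simp; omega
  rw [h1, h2, ← List.countP_eq_length_filter, pvCntRange P c i (by omega)]
  omega

theorem pvCntGe (P : List Int) (c : Int) (i m : Nat) (him : i ≤ m) (hm : m ≤ P.length) :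
    ((PySem.List.pyRange 0 (m : Int) 1).filter (fun j => PySem.List.pyGetD P j 0 == c)).countP
        (fun j => decide ((i : Int) ≤ j))
      = ((P.take m).drop i).count c := by
  rw [PySem.List.pyRange_one_append 0 (i : Int) (m : Int) (by positivity) (by exact_mod_cast him),
      List.filter_append, List.countP_append]
  have h1 : (((PySem.List.pyRange 0 (i : Int) 1).filter
      (fun j => PySem.List.pyGetD P j 0 == c)).countP (fun j => decide ((i : Int) ≤ j))) = 0 := by
    rw [List.countP_eq_zero]
    intro j hj
    have := (PySem.List.mem_pyRange_one.1 (List.mem_of_mem_filter hj)).2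
    simp; omega
  have h2 : (((PySem.List.pyRange (i : Int) (m : Int) 1).filter
      (fun j => PySem.List.pyGetD P j 0 == c)).countP (fun j => decide ((i : Int) ≤ j)))
      = ((PySem.List.pyRange (i : Int) (m : Int) 1).filter (fun j => PySem.List.pyGetD P j 0 == c)).length := by
    rw [List.countP_eq_length]
    intro j hj
    have := (PySem.List.mem_pyRange_one.1 (List.mem_of_mem_filter hj)).1
    simp; omega
  rw [h1, h2, ← List.countP_eq_length_filter]
  -- split the full range count
  have hsplit : (PySem.List.pyRange 0 (m : Int) 1).countP (fun j => PySem.List.pyGetD P j 0 == c)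
      = (PySem.List.pyRange 0 (i : Int) 1).countP (fun j => PySem.List.pyGetD P j 0 == c)
        + (PySem.List.pyRange (i : Int) (m : Int) 1).countP (fun j => PySem.List.pyGetD P j 0 == c) := by
    rw [PySem.List.pyRange_one_append 0 (i : Int) (m : Int) (by positivity) (by exact_mod_cast him),
        List.countP_append]
  have htk : (P.take m).count c = (P.take i).count c + ((P.take m).drop i).count c := by
    conv_lhs => rw [← List.take_append_drop i (P.take m)]
    rw [List.count_append, List.take_take, min_eq_left him]
  have e1 := pvCntRange P c i (by omega)
  have e2 := pvCntRange P c m hm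
  omega

-- the bucket dict of B: lookup at c is exactly the filtered index range
theorem pvPosSpec (P : List Int) (mI : Int) (c : Int) :
    (((PySem.List.pyRange 0 mI 1).map (fun j => (PySem.List.pyGetD P j 0, j))).foldl
        (fun d q => d.modify q.1 [] (· ++ [q.2])) (PySem.Dict.empty : PySem.Dict Int (List Int))).getD c []
      = (PySem.List.pyRange 0 mI 1).filter (fun j => PySem.List.pyGetD P j 0 == c) := by
  rw [PySem.Dict.getD_foldl_modify_append]
  simp [List.filter_map, Function.comp_def]

-- what A's loop body computes for index i and value v, with the counters replaced by counts
def pvCurr (P : List Int) (t k n : Int) (i v : Int) : Int :=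
  if PySem.Int.band (t + k - v) 1 == 0 then
    (if 0 < i then ((P.take i.toNat).count ((t + k - v) >>> (1 : Nat)) : Int) else 0) +
    (if i + 1 < n then
        ((P.drop i.toNat).count (((t + k - v) >>> (1 : Nat)) + v - k) : Int)
          - (if ((t + k - v) >>> (1 : Nat)) + v - k = t then 1 else 0)
      else 0)
  else 0

-- A's loop with its rolling counters equals a pure fold of pvCurr
theorem pvLoopA (P : List Int) (t k n : Int) :
    ∀ (l : List Int) (s : Nat) (prev next : PySem.Dict Int Int) (m : Int),
    s + l.length = P.length →
    (∀ v, prev.getD v 0 = ((P.take s).count v : Int)) →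
    (∀ v, next.getD v 0 = ((P.drop s).count v : Int) - (if v = t then 1 else 0)) →
    ((PySem.List.enumerate l (s : Int)).foldl (pvStepA P t k n) (prev, next, m)).2.2
      = (PySem.List.enumerate l (s : Int)).foldl
          (fun m p => if p.2 ≠ k then max m (pvCurr P t k n p.1 p.2) else m) m := by
  intro l
  induction l with
  | nil => intro s prev next m _ _ _; simp [PySem.List.enumerate_nil]
  | cons x xs ih =>
    intro s prev next m hs hprev hnext
    have hsP : s < P.length := by simp at hs; omega
    rw [PySem.List.enumerate_cons, List.foldl_cons, List.foldl_cons]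
    have hpv : PySem.List.pyGetD P ((s : Nat) : Int) 0 = P[s] := by
      rw [PySem.List.pyGetD_natCast, List.getD_eq_getElem]
    have hm' : (pvStepA P t k n (prev, next, m) ((s : Int), x)).2.2
        = (if x ≠ k then max m (pvCurr P t k n (s : Int) x) else m) := by
      simp only [pvStepA, pvCurr, hprev, hnext, Int.toNat_natCast]
    have hstep : pvStepA P t k n (prev, next, m) ((s : Int), x)
        = (prev.modify P[s] 0 (· + 1), next.modify P[s] 0 (· - 1),
           if x ≠ k then max m (pvCurr P t k n (s : Int) x) else m) := by
      rw [← hm']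
      simp only [pvStepA, hpv]
    rw [hstep]
    have hcast : ((s : Int) + 1) = ((s + 1 : Nat) : Int) := by push_cast; ring
    rw [hcast]
    have htake : P.take (s + 1) = P.take s ++ [P[s]] := by
      rw [List.take_add_one, List.getElem?_eq_getElem hsP]; rfl
    have hdrop : P.drop s = P[s] :: P.drop (s + 1) := List.drop_eq_getElem_cons hsP
    apply ih (s + 1)
    · simp only [List.length_cons] at hs; omega
    · intro v
      rw [PySem.Dict.getD_modify, htake, List.count_append]
      by_cases hv : v = P[s]
      · subst hv; simp [hprev]
      · simp [hprev, hv, Ne.symm hv]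
    · intro v
      rw [PySem.Dict.getD_modify]
      have hcnt : (List.count v (List.drop s P) : Int)
          = (List.count v (List.drop (s + 1) P) : Int) + (if v = P[s] then 1 else 0) := by
        rw [hdrop, List.count_cons]
        push_cast
        by_cases hv : v = P[s]
        · simp [hv]
        · simp [hv]
          exact fun h => hv h.symm
      simp only [hnext]
      by_cases hv : v = P[s]
      · subst hv
        rw [if_pos rfl] at hcnt ⊢
        split_ifs <;> omega
      · rw [if_neg hv] at hcnt ⊢
        split_ifs <;> omega

-- Python's  a >> 1  is floor division by 2
theorem pvShiftOne (a : Int) : a >>> (1 : Nat) = PySem.Int.floordiv a 2 := by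
  rw [PySem.Int.floordiv_eq_ediv_of_pos (by omega)]
  have := Int.shiftRight_eq_div_pow a 1
  simpa using this

-- per-index equality of A's pure step and B's step, and its sign side condition
theorem pvStepEq (P : List Int) (t k : Int) (pos : PySem.Dict Int (List Int))
    (hpos : ∀ c, pos.getD c []
      = (PySem.List.pyRange 0 ((P.length - 1 : Nat) : Int) 1).filter (fun j => PySem.List.pyGetD P j 0 == c))
    (hPC : P = P.take (P.length - 1) ++ [t])
    (i v m : Int) (hm : 0 ≤ m) (hi0 : 0 ≤ i) (hilen : i < (P.length : Int)) :
    (if v ≠ k then max m (pvCurr P t k (P.length : Int) i v) else m) = pvStepB pos t k m (i, v) := by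
  have hlen1 : 1 ≤ P.length := by omega
  have hiN : i = ((i.toNat : Nat) : Int) := (Int.toNat_of_nonneg hi0).symm
  have hiNm : i.toNat ≤ P.length - 1 := by omega
  have hshift := pvShiftOne
  by_cases hvk : v = k
  · simp [pvStepB, hvk]
  · rw [if_pos hvk]
    by_cases hpar : PySem.Int.mod (t + k - v) 2 = 0
    · -- even case: the two counted values agree
      have hB : pvStepB pos t k m (i, v)
          = max m (((P.take i.toNat).count (PySem.Int.floordiv (t + k - v) 2) : Int)
              + (((P.take (P.length - 1)).drop i.toNat).count (PySem.Int.floordiv (t + k - v) 2 + v - k) : Int)) := by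
        have hcLt := pvCntLt P (PySem.Int.floordiv (t + k - v) 2) i.toNat (P.length - 1) hiNm (by omega)
        have hcGe := pvCntGe P (PySem.Int.floordiv (t + k - v) 2 + v - k) i.toNat (P.length - 1) hiNm (by omega)
        rw [← hiN] at hcLt hcGe
        simp only [pvStepB, hpar, bne_self_eq_false, Bool.false_eq_true, if_false, beq_iff_eq, hvk]
        rw [hpos, hpos, hcLt, hcGe]
      rw [hB]
      have hparA : (PySem.Int.band (t + k - v) 1 == 0) = true := by
        rw [PySem.Int.band_one, hpar]; rfl
      congr 1
      simp only [pvCurr, hparA, if_true, hshift]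
      congr 1
      · -- prev part
        by_cases h0 : 0 < i
        · rw [if_pos h0]
        · rw [if_neg h0]
          have : i.toNat = 0 := by omega
          simp [this]
      · -- next part
        by_cases hlast : i + 1 < (P.length : Int)
        · rw [if_pos hlast]
          have hle : i.toNat ≤ (P.take (P.length - 1)).length := by
            rw [List.length_take]; omega
          have hdropP : P.drop i.toNat = (P.take (P.length - 1)).drop i.toNat ++ [t] := by
            conv_lhs => rw [hPC]
            rw [List.drop_append_of_le_length hle]
          rw [hdropP, List.count_append]
          by_cases hwt : PySem.Int.floordiv (t + k - v) 2 + v - k = t <;>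
            simp [List.count_singleton] <;> omega
        · rw [if_neg hlast]
          have : i.toNat = P.length - 1 := by omega
          rw [this]
          have : (P.take (P.length - 1)).drop (P.length - 1) = [] := by
            apply List.drop_eq_nil_of_le
            rw [List.length_take]; omega
          simp [this]
    · -- odd case: A adds max m 0, B skips
      have hparA : (PySem.Int.band (t + k - v) 1 == 0) = false := by
        rw [PySem.Int.band_one]; exact beq_eq_false_iff_ne.2 hpar
      simp only [pvCurr, hparA, Bool.false_eq_true, if_false]
      simp only [pvStepB, beq_iff_eq, hvk, ite_false]
      have : (PySem.Int.mod (t + k - v) 2 != 0) = true := bne_iff_ne.2 hpar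
      rw [if_pos this]
      exact max_eq_left hm

theorem pvFoldEq (P : List Int) (t k : Int) (pos : PySem.Dict Int (List Int))
    (hpos : ∀ c, pos.getD c []
      = (PySem.List.pyRange 0 ((P.length - 1 : Nat) : Int) 1).filter (fun j => PySem.List.pyGetD P j 0 == c))
    (hPC : P = P.take (P.length - 1) ++ [t]) :
    ∀ (l : List (Int × Int)) (m0 : Int), 0 ≤ m0 →
    (∀ p ∈ l, 0 ≤ p.1 ∧ p.1 < (P.length : Int)) →
    l.foldl (fun m p => if p.2 ≠ k then max m (pvCurr P t k (P.length : Int) p.1 p.2) else m) m0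
      = l.foldl (pvStepB pos t k) m0 := by
  intro l
  induction l with
  | nil => intro m0 _ _; rfl
  | cons p l ih =>
    intro m0 hm0 hmem
    obtain ⟨hp0, hplen⟩ := hmem p (by simp)
    rw [List.foldl_cons, List.foldl_cons,
        ← pvStepEq P t k pos hpos hPC p.1 p.2 m0 hm0 hp0 hplen]
    apply ih
    · by_cases hvk : p.2 ≠ k <;> simp [hvk] <;> omega
    · intro q hq; exact hmem q (by simp [hq])

theorem ways_to_partition_spec : Claim_equal_ways_to_partition := by
  intro nums k _ hne
  have hlen1 : 1 ≤ nums.length := by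
    rcases nums with _ | ⟨a, l⟩
    · exact absurd rfl hne
    · simp
  have hPlen : (pvAccFrom 0 nums).length = nums.length := pvAccFrom_length 0 nums
  set P := pvAccFrom 0 nums with hP
  have hPne : P ≠ [] := by
    intro h; rw [h] at hPlen; simp at hPlen; omega
  set t := P.getLastD 0 with ht
  have htot : (PySem.List.pyGet? P (-1)).getD 0 = t := by
    simp [pysem, ht, List.getLastD_eq_getLast?]
  have hPC : P = P.take (P.length - 1) ++ [t] := by
    conv_lhs => rw [← List.dropLast_append_getLast hPne]
    rw [List.dropLast_eq_take, ht, List.getLastD_eq_getLast?, List.getLast?_eq_some_getLast hPne]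
    rfl
  have hpre : (nums.foldl (fun st x => (st.1 ++ [st.2 + x], st.2 + x)) (([] : List Int), (0 : Int))).1 = P := by
    rw [pvB_prefix_eq]; simp [hP]
  have hcast : ((nums.length : Int) - 1) = ((P.length - 1 : Nat) : Int) := by
    rw [hPlen]; omega
  have hpos : ∀ c, (((PySem.List.pyRange 0 ((nums.length : Int) - 1) 1).map
        (fun j => (PySem.List.pyGetD P j 0, j))).foldl
        (fun d q => d.modify q.1 [] (· ++ [q.2])) (PySem.Dict.empty : PySem.Dict Int (List Int))).getD c []
      = (PySem.List.pyRange 0 ((P.length - 1 : Nat) : Int) 1).filter (fun j => PySem.List.pyGetD P j 0 == c) := by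
    intro c; rw [hcast]; exact pvPosSpec P _ c
  have hnext0 : ∀ v, ((PySem.Dict.counter P).modify t 0 (· - 1)).getD v 0
      = ((P.drop 0).count v : Int) - (if v = t then 1 else 0) := by
    intro v
    rw [PySem.Dict.getD_modify]
    by_cases hv : v = t <;> simp [hv, PySem.Dict.getD_counter]
  have hcount : ∀ v, (P.count v : Int) = ((P.take (P.length - 1)).count v : Int) + (if t = v then 1 else 0) := by
    intro v
    conv_lhs => rw [hPC]
    rw [List.count_append, List.count_singleton]
    push_cast
    by_cases hv : t = v <;> simp [hv]
  -- the shared starting value of both loops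
  have hm0 : (if PySem.Int.band t 1 == 0
        then ((PySem.Dict.counter P).modify t 0 (· - 1)).getD (t >>> (1 : Nat)) 0 else 0)
      = (if PySem.Int.mod t 2 == 0
        then (((((PySem.List.pyRange 0 ((nums.length : Int) - 1) 1).map
            (fun j => (PySem.List.pyGetD P j 0, j))).foldl
            (fun d q => d.modify q.1 [] (· ++ [q.2])) (PySem.Dict.empty : PySem.Dict Int (List Int))).getD
              (PySem.Int.floordiv t 2) []).length : Int) else 0) := by
    rw [PySem.Int.band_one]
    by_cases hpar : PySem.Int.mod t 2 = 0
    · have hbt : (PySem.Int.mod t 2 == 0) = true := by rw [hpar]; rfl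
      rw [if_pos hbt, if_pos hbt]
      rw [hpos, ← List.countP_eq_length_filter, pvShiftOne, hnext0]
      rw [pvCntRange P (PySem.Int.floordiv t 2) (P.length - 1) (by omega)]
      rw [List.drop_zero, hcount]
      by_cases hv : PySem.Int.floordiv t 2 = t
      · rw [if_pos hv, if_pos hv.symm]; omega
      · rw [if_neg hv, if_neg (fun h => hv h.symm)]; omega
    · have hbf : (PySem.Int.mod t 2 == 0) = false := beq_eq_false_iff_ne.2 hpar
      rw [if_neg (by rw [hbf]; simp), if_neg (by rw [hbf]; simp)]
  have hm0nn : 0 ≤ (if PySem.Int.band t 1 == 0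
      then ((PySem.Dict.counter P).modify t 0 (· - 1)).getD (t >>> (1 : Nat)) 0 else 0) := by
    rw [PySem.Int.band_one]
    by_cases hpar : PySem.Int.mod t 2 = 0
    · have hbt : (PySem.Int.mod t 2 == 0) = true := by rw [hpar]; rfl
      rw [if_pos hbt, pvShiftOne, hnext0, List.drop_zero, hcount]
      by_cases hv : PySem.Int.floordiv t 2 = t
      · rw [if_pos hv, if_pos hv.symm]; omega
      · rw [if_neg hv, if_neg (fun h => hv h.symm)]; omega
    · have hbf : (PySem.Int.mod t 2 == 0) = false := beq_eq_false_iff_ne.2 hpar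
      rw [if_neg (by rw [hbf]; simp)]
  -- A's loop rewritten as the pure fold
  have hA := pvLoopA P t k (nums.length : Int) nums 0 PySem.Dict.empty
      ((PySem.Dict.counter P).modify t 0 (· - 1))
      (if PySem.Int.band t 1 == 0
        then ((PySem.Dict.counter P).modify t 0 (· - 1)).getD (t >>> (1 : Nat)) 0 else 0)
      (by simpa using hPlen.symm)
      (by intro v; simp [PySem.Dict.getD_empty])
      hnext0
  -- the two pure folds agree
  have hF := pvFoldEq P t k _ hpos hPC (PySem.List.enumerate nums ((0 : Nat) : Int))
      (if PySem.Int.band t 1 == 0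
        then ((PySem.Dict.counter P).modify t 0 (· - 1)).getD (t >>> (1 : Nat)) 0 else 0)
      hm0nn
      (by
        intro p hp
        rw [Nat.cast_zero] at hp
        obtain ⟨j, hj, rfl⟩ := (PySem.List.mem_enumerate_iff _ _ _).1 hp
        constructor
        · simp
        · simp
          omega)
  rw [Nat.cast_zero] at hA hF
  rw [hPlen] at hF
  unfold Spec_ways_to_partition ways_to_partition ways_to_partition_alt
  simp only [← hP, htot, hpre]
  rw [← hm0, hA, hF]

-- ===== VERDICT (by name: the statement is the Claim_ definition above) =====
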